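-- pv_equiv track=rewrite | github.com/wilmurillo-ai/Design-Assistant | .skills/openclaw-skills/skills/dinesh18s/habitchat/scripts/coach.py | find_habit
-- ===== SOURCE A (Python) =====
-- def find_habit(habits, query):
--     query_lower = query.lower().strip()
--     for h in habits:
--         if h["id"] == query_lower or h["id"].startswith(query_lower):
--             return h
--     for h in habits:
--         if h["name"].lower() == query_lower:
--             return h
--     for h in habits:
--         if query_lower in h["name"].lower():
--             return h
--     return None
-- ===== SOURCE B (Python) =====
-- def find_habit(habits, query):
--     q = query.lower().strip()
--     for h in habits:
--         if h["id"].startswith(q):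
--             return h
--     sub = None
--     for h in habits:
--         name = h["name"].lower()
--         if name == q:
--             return h
--         if sub is None and q in name:
--             sub = h
--     return sub
-- ===== Notes on version B (the rewrite author's own statement) =====
-- stated objective: alternative
-- what changed: B keeps the id-tier loop but replaces A's second and third scans with ONE pass that returns on the first exact lowercase-name match and otherwise tracks the first substring candidate in a variable, returning it after the loop; the redundant 'id == q or' test is dropped since equality implies startswith.
import Mathlib
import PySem

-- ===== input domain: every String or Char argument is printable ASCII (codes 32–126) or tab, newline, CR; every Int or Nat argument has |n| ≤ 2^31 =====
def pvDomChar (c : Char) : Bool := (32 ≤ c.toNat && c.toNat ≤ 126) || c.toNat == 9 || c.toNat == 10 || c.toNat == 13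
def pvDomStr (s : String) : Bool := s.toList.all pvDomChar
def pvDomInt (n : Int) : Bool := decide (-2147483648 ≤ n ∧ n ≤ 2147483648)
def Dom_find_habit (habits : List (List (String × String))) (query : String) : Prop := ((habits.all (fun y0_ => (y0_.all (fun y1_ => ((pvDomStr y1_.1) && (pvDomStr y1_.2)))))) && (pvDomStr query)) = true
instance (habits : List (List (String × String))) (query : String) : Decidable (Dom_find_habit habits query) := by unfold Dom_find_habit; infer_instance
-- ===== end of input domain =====

-- B keeps A's id-tier loop but merges A's two name loops into ONE candidate-tracking pass; equal return value on Pre_ (no side effects).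

-- ===== PORT A =====
-- h[k] on a dict rendered as an association list: first matching key; "" stands in for the
-- KeyError case, which Pre_find_habit excludes (every habit must contain "id" and "name").
def keyGetD (h : List (String × String)) (k : String) : String :=
  match h with
  | [] => ""
  | (k', v) :: t => if k' == k then v else keyGetD t k

-- 'for h in habits: if p h: return h' — the shape of each of A's three loops
def firstMatch (p : List (String × String) → Bool) : List (List (String × String)) → Option (List (String × String))
  | [] => none
  | h :: t => if p h then some h else firstMatch p t

-- the body of A after computing query_lower (ql)
def aGo (ql : String) (habits : List (List (String × String))) : Option (List (String × String)) :=
  match firstMatch (fun h => (keyGetD h "id" == ql) || PySem.Str.startswith (keyGetD h "id") ql) habits with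
  | some h => some h
  | none =>
    match firstMatch (fun h => PySem.Str.lower (keyGetD h "name") == ql) habits with
    | some h => some h
    | none => firstMatch (fun h => PySem.Str.isIn ql (PySem.Str.lower (keyGetD h "name"))) habits

def find_habit (habits : List (List (String × String))) (query : String) : Option (List (String × String)) :=
  aGo (PySem.Str.strip (PySem.Str.lower query)) habits

-- ===== PORT B =====
-- Source B's second loop: return on exact name match, remember the first substring candidate
def bScan (ql : String) : List (List (String × String)) → Option (List (String × String)) → Option (List (String × String))
  | [], sub => sub
  | h :: t, sub =>
    let name := PySem.Str.lower (keyGetD h "name")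
    if name == ql then some h
    else bScan ql t (if sub.isNone && PySem.Str.isIn ql name then some h else sub)

-- the body of B after computing q (ql)
def bGo (ql : String) (habits : List (List (String × String))) : Option (List (String × String)) :=
  match firstMatch (fun h => PySem.Str.startswith (keyGetD h "id") ql) habits with
  | some h => some h
  | none => bScan ql habits none

def find_habit_alt (habits : List (List (String × String))) (query : String) : Option (List (String × String)) :=
  bGo (PySem.Str.strip (PySem.Str.lower query)) habits

-- ===== PRECONDITION & SPEC =====
-- Pre_ is exactly the inputs on which Python A returns (no KeyError): every habit before the
-- first id-tier match carries "id", and, unless an id-tier match exists, every habit before the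
-- first exact-name match carries "name".
def Pre_find_habit (habits : List (List (String × String))) (query : String) : Prop :=
  let ql := PySem.Str.strip (PySem.Str.lower query)
  let lookup := fun (h : List (String × String)) (k : String) =>
    ((h.find? (fun kv => kv.1 == k)).map (fun kv => kv.2)).getD ""
  let cond1 := fun (h : List (String × String)) =>
    h.any (fun kv => kv.1 == "id") && PySem.Str.startswith (lookup h "id") ql
  let cond2 := fun (h : List (String × String)) =>
    h.any (fun kv => kv.1 == "name") && (PySem.Str.lower (lookup h "name") == ql)
  ((habits.takeWhile (fun h => !cond1 h)).all (fun h => h.any (fun kv => kv.1 == "id"))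
    && (habits.any cond1
        || (habits.takeWhile (fun h => !cond2 h)).all (fun h => h.any (fun kv => kv.1 == "name")))) = true
instance (habits : List (List (String × String))) (query : String) : Decidable (Pre_find_habit habits query) := by unfold Pre_find_habit; infer_instance

def pvWitness_find_habit : (List (List (String × String))) × String :=
  ([[("id", "run"), ("name", "Run daily")]], "Run")

def Spec_find_habit (habits : List (List (String × String))) (query : String) (out : Option (List (String × String))) : Prop := out = find_habit_alt habits query
instance (habits : List (List (String × String))) (query : String) (out : Option (List (String × String))) : Decidable (Spec_find_habit habits query out) := by unfold Spec_find_habit; infer_instance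

-- ===== CLAIM (what is proved, stated in full; the proofs are below) =====
def Claim_equal_find_habit : Prop := ∀ (habits : List (List (String × String))) (query : String), Dom_find_habit habits query → Pre_find_habit habits query → Spec_find_habit habits query (find_habit habits query)

-- ===== LEMMAS AND PROOFS =====

-- 'id == q or id.startswith(q)' is just startswith (equality implies prefix)
theorem eq_or_startswith (a b : String) :
    ((a == b) || PySem.Str.startswith a b) = PySem.Str.startswith a b := by
  by_cases h : a = b
  · subst h
    simp [PySem.Str.startswith_eq, PySem.Chars.startswith_iff]
  · simp [beq_iff_eq, h]

theorem firstMatch_eq_find? (p : List (String × String) → Bool) (hs : List (List (String × String))) :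
    firstMatch p hs = hs.find? p := by
  induction hs with
  | nil => rfl
  | cons h t ih => simp [firstMatch, List.find?, ih]; cases p h <;> simp

-- B's merged loop realises A's loops 2 and 3 in priority order
theorem bScan_char (ql : String) (hs : List (List (String × String))) (sub : Option (List (String × String))) :
    bScan ql hs sub =
      (hs.find? (fun h => PySem.Str.lower (keyGetD h "name") == ql)).or
        (sub.or (hs.find? (fun h => PySem.Str.isIn ql (PySem.Str.lower (keyGetD h "name"))))) := by
  induction hs generalizing sub with
  | nil => simp [bScan]
  | cons h t ih =>
    simp only [bScan, List.find?]
    cases h2 : (PySem.Str.lower (keyGetD h "name") == ql) with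
    | true => simp
    | false =>
      simp [ih]
      cases sub <;> cases h3 : PySem.Chars.isIn ql.toList (PySem.Chars.lower (keyGetD h "name").toList) <;>
        simp

-- ===== VERDICT (by name: the statement is the Claim_ definition above) =====
theorem find_habit_spec : Claim_equal_find_habit := by
  intro habits query _ _
  unfold Spec_find_habit find_habit find_habit_alt
  generalize PySem.Str.strip (PySem.Str.lower query) = ql
  unfold aGo bGo
  have hp : (fun h => (keyGetD h "id" == ql) || PySem.Str.startswith (keyGetD h "id") ql)
      = (fun h => PySem.Str.startswith (keyGetD h "id") ql) := by
    funext h; exact eq_or_startswith _ _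
  simp only [firstMatch_eq_find?]
  rw [hp, bScan_char]
  cases habits.find? (fun h => PySem.Str.startswith (keyGetD h "id") ql) <;>
    cases habits.find? (fun h => PySem.Str.lower (keyGetD h "name") == ql) <;>
    simp
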